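-- pv_equiv track=rewrite | github.com/damoyo/DD-Burrows-Wheeler | invBWT.py | rankBwt
-- ===== SOURCE A (Python) =====
-- def rankBwt(bw):
--
--     tples = dict()
--     ranks =	[]
--     for	c in bw:
--         if c not in	tples:
--             tples[c]	= 0
--         ranks.append(tples[c])
--         tples[c]	+= 1
--     return ranks, tples
-- ===== SOURCE B (Python) =====
-- def rankBwt(bw):
--     # Pass 1: index every position of each char, keyed in first-occurrence order.
--     positions = {}
--     for i, c in enumerate(bw):
--         positions.setdefault(c, []).append(i)
--     # Pass 2: grouped assignment of ranks, and per-char totals.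
--     ranks = [0] * len(bw)
--     tples = {}
--     for c, ps in positions.items():
--         for r, i in enumerate(ps):
--             ranks[i] = r
--         tples[c] = len(ps)
--     return ranks, tples
-- ===== Notes on version B (the rewrite author's own statement) =====
-- stated objective: alternative
-- what changed: A computes ranks in one pass with a running per-char counter dict; B first builds a char -> list-of-positions index, then assigns ranks group by group by enumerating each position list into a preallocated ranks array and takes tples[c] = len(positions).
import Mathlib
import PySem

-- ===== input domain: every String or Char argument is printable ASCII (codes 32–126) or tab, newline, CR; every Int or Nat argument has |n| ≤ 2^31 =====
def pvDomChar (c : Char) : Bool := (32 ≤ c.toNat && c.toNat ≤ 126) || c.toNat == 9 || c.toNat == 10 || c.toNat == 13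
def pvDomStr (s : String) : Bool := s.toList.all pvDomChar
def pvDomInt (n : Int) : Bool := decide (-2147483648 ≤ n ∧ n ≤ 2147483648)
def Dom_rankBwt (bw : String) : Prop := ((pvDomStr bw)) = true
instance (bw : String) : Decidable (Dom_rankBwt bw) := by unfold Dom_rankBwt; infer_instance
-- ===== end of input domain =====

-- B replaces A's single running-counter pass by a position-index pass followed by a grouped
-- rank-assignment pass (objective: alternative decomposition, same exact results).

-- a Python one-character string (dict key) from a char
def pvKey (c : Char) : String := String.ofList [c]

-- ===== PORT A =====
-- the body of A's 'for c in bw' loop: tples/ranks state, setdefault-style init, append, increment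
def rankBwtStep (st : PySem.Dict String Int × List Int) (c : Char) :
    PySem.Dict String Int × List Int :=
  let k := pvKey c
  let t0 := if st.1.contains k then st.1 else st.1.insert k 0   -- if c not in tples: tples[c] = 0
  let r := st.2 ++ [t0.getD k 0]                                -- ranks.append(tples[c])
  (t0.insert k (t0.getD k 0 + 1), r)                            -- tples[c] += 1

def rankBwt (bw : String) : List Int × (List (String × Int)) :=
  let st := bw.toList.foldl rankBwtStep (PySem.Dict.empty, [])
  (st.2, st.1.items)

-- ===== PORT B =====
def rankBwt_alt (bw : String) : List Int × (List (String × Int)) :=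
  let cs := bw.toList
  -- pass 1: positions.setdefault(c, []).append(i)
  let positions : PySem.Dict String (List Int) :=
    (PySem.List.enumerate cs 0).foldl
      (fun d p => d.modify (pvKey p.2) [] (fun l => l ++ [p.1])) PySem.Dict.empty
  -- pass 2: grouped assignment ranks[i] = r and tples[c] = len(ps)
  let st := positions.items.foldl
      (fun (st : List Int × PySem.Dict String Int) p =>
        ((PySem.List.enumerate p.2 0).foldl (fun r q => PySem.List.pySetD r q.2 q.1) st.1,
         st.2.insert p.1 (p.2.length : Int)))
      (List.replicate cs.length (0 : Int), PySem.Dict.empty)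
  (st.1, st.2.items)

-- ===== PRECONDITION & SPEC =====
def Spec_rankBwt (bw : String) (out : List Int × (List (String × Int))) : Prop := out = rankBwt_alt bw
instance (bw : String) (out : List Int × (List (String × Int))) : Decidable (Spec_rankBwt bw out) := by unfold Spec_rankBwt; infer_instance

-- ===== CLAIM (what is proved, stated in full; the proofs are below) =====
def Claim_equal_rankBwt : Prop := ∀ (bw : String), Dom_rankBwt bw → Spec_rankBwt bw (rankBwt bw)

-- ===== LEMMAS AND PROOFS =====

-- the common reference value: ranks[i] = count of cs[i] among cs[0:i]
def specRanks (cs : List Char) : List Int :=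
  cs.zipIdx.map (fun p => (((cs.take p.2).count p.1 : Nat) : Int))

lemma pvKey_beq (c d : Char) : (pvKey c == pvKey d) = (c == d) := by
  by_cases h : c = d
  · simp [h]
  · have hne : pvKey c ≠ pvKey d := fun he => h (by simpa [pvKey] using congrArg String.toList he)
    simp [h, hne]

-- ---- A side ----

lemma stepA_eq (d : PySem.Dict String Int) (r : List Int) (c : Char) :
    rankBwtStep (d, r) c
      = (d.insert (pvKey c) (d.getD (pvKey c) 0 + 1), r ++ [d.getD (pvKey c) 0]) := by
  by_cases h : d.contains (pvKey c) = true
  · simp [rankBwtStep, h]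
  · have h' : d.contains (pvKey c) = false := by simpa using h
    simp [rankBwtStep, h', PySem.Dict.getD_of_not_contains d 0 h',
      PySem.Dict.getD_insert_self, PySem.Dict.insert_insert_self]

lemma specRanks_append (cs : List Char) (c : Char) :
    specRanks (cs ++ [c]) = specRanks cs ++ [((cs.count c : Nat) : Int)] := by
  unfold specRanks
  rw [List.zipIdx_append, List.map_append]
  congr 1
  · apply List.map_congr_left
    intro p hp
    have hlt : p.2 < cs.length := by
      rcases p with ⟨x, i⟩
      have := List.mem_zipIdx hp
      omega
    rw [List.take_append_of_le_length (le_of_lt hlt)]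
  · simp

lemma foldA (cs : List Char) :
    cs.foldl rankBwtStep (PySem.Dict.empty, ([] : List Int))
      = ((cs.map pvKey).foldl (fun d k => d.insert k (d.getD k 0 + 1)) PySem.Dict.empty,
         specRanks cs) := by
  induction cs using List.reverseRecOn with
  | nil => simp [specRanks]
  | append_singleton cs c ih =>
    rw [List.foldl_append, ih, List.map_append, List.foldl_append]
    simp only [List.foldl_cons, List.foldl_nil, List.map_cons, List.map_nil]
    rw [stepA_eq, specRanks_append, PySem.Dict.getD_foldl_insert_add_one]
    have hinj : Function.Injective pvKey := fun a b h => by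
      simpa [pvKey] using congrArg String.toList h
    simp [List.count_map_of_injective _ pvKey hinj, PySem.Dict.getD_empty]

lemma rankBwt_eq (bw : String) :
    rankBwt bw = (specRanks bw.toList, (PySem.Dict.counter (bw.toList.map pvKey)).items) := by
  unfold rankBwt
  rw [foldA, PySem.Dict.foldl_insert_getD_add_one_eq_counter]

-- ---- B side ----

-- pass-1 dictionary of B
def posD (cs : List Char) : PySem.Dict String (List Int) :=
  (PySem.List.enumerate cs 0).foldl
    (fun d p => d.modify (pvKey p.2) [] (fun l => l ++ [p.1])) PySem.Dict.empty

lemma posD_getD (cs : List Char) (k : String) :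
    (posD cs).getD k []
      = ((PySem.List.enumerate cs 0).filter (fun p => pvKey p.2 == k)).map (·.1) := by
  have h : posD cs = ((PySem.List.enumerate cs 0).map (fun p => (pvKey p.2, p.1))).foldl
      (fun d p => d.modify p.1 [] (fun l => l ++ [p.2])) PySem.Dict.empty := by
    rw [List.foldl_map]; rfl
  rw [h, PySem.Dict.getD_foldl_modify_append]
  simp [List.filter_map, Function.comp_def, List.map_map, PySem.Dict.getD_empty]

lemma posD_keys (cs : List Char) : (posD cs).keys = PySem.Set.ofList (cs.map pvKey) := by
  unfold posD
  have h := PySem.Dict.keys_foldl_modify_key (PySem.List.enumerate cs 0)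
    (fun p : Int × Char => pvKey p.2) ([] : List Int) (fun _ p => fun l => l ++ [p.1])
    PySem.Dict.empty
  simp only [PySem.Dict.keys_empty, PySem.Set.update_nil_left] at h
  rw [h]
  congr 1
  rw [show (fun (p : Int × Char) => pvKey p.2) = pvKey ∘ (fun p => p.2) from rfl,
    ← List.map_map, PySem.List.map_snd_enumerate]

lemma posD_nodup (cs : List Char) : (posD cs).keys.Nodup := by
  rw [posD_keys]
  exact PySem.Set.nodup_ofList _

-- enumerate distributes over append
lemma enumerate_append {α : Type} (xs ys : List α) (s : Int) :
    PySem.List.enumerate (xs ++ ys) s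
      = PySem.List.enumerate xs s ++ PySem.List.enumerate ys (s + xs.length) := by
  induction xs generalizing s with
  | nil => simp [PySem.List.enumerate_nil]
  | cons x xs ih =>
    simp only [List.cons_append, PySem.List.enumerate_cons, ih, List.length_cons]
    rw [show s + 1 + (xs.length : Int) = s + ((xs.length : Int) + 1) from by ring]
    simp

lemma mem_enumerate_snd {α : Type} {q : Int × α} {xs : List α} {s : Int}
    (h : q ∈ PySem.List.enumerate xs s) : q.2 ∈ xs := by
  have h2 := List.mem_map_of_mem (f := fun x => x.2) h
  rwa [PySem.List.map_snd_enumerate] at h2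

lemma mem_enumerate_fst_bounds {α : Type} {q : Int × α} {xs : List α} {s : Int}
    (h : q ∈ PySem.List.enumerate xs s) : s ≤ q.1 ∧ q.1 < s + xs.length := by
  have h2 := List.mem_map_of_mem (f := fun x => x.1) h
  rw [PySem.List.map_fst_enumerate] at h2
  exact PySem.List.mem_pyRange_one.mp h2

lemma mem_enumerate_iff {α : Type} (xs : List α) (s : Int) (q : Int × α) :
    q ∈ PySem.List.enumerate xs s
      ↔ ∃ j : Nat, j < xs.length ∧ q.1 = s + j ∧ xs[j]? = some q.2 := by
  induction xs generalizing s with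
  | nil => simp [PySem.List.enumerate_nil]
  | cons x xs ih =>
    simp only [PySem.List.enumerate_cons, List.mem_cons, ih, List.length_cons]
    constructor
    · rintro (rfl | ⟨j, hj, h1, h2⟩)
      · exact ⟨0, by omega, by simp, by simp⟩
      · exact ⟨j + 1, by omega, by push_cast; omega, by simpa using h2⟩
    · rintro ⟨j, hj, h1, h2⟩
      cases j with
      | zero =>
        left
        simp only [List.getElem?_cons_zero, Option.some.injEq] at h2
        rcases q with ⟨a, b⟩
        simp only [Nat.cast_zero, add_zero] at h1
        simp_all
      | succ j =>
        right
        exact ⟨j, by omega, by push_cast at h1 ⊢; omega, by simpa using h2⟩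

-- folding scattered writes
def writeFold (ws : List (Int × Int)) (r : List Int) : List Int :=
  ws.foldl (fun r q => PySem.List.pySetD r q.2 q.1) r

lemma writeFold_length (ws : List (Int × Int)) (r : List Int) :
    (writeFold ws r).length = r.length := by
  induction ws generalizing r with
  | nil => rfl
  | cons q ws ih => simp [writeFold, List.foldl_cons] at ih ⊢; rw [ih, PySem.List.length_pySetD]

lemma writeFold_getElem?_of_not_mem (ws : List (Int × Int)) (r : List Int) (t : Nat)
    (hpos : ∀ q ∈ ws, 0 ≤ q.2) (h : ∀ q ∈ ws, q.2 ≠ (t : Int)) :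
    (writeFold ws r)[t]? = r[t]? := by
  induction ws generalizing r with
  | nil => rfl
  | cons q ws ih =>
    have h0 : 0 ≤ q.2 := hpos q (by simp)
    have hne : q.2 ≠ (t : Int) := h q (by simp)
    show (writeFold ws (PySem.List.pySetD r q.2 q.1))[t]? = r[t]?
    rw [ih _ (fun p hp => hpos p (List.mem_cons_of_mem _ hp))
          (fun p hp => h p (List.mem_cons_of_mem _ hp))]
    rw [PySem.List.pySetD_of_nonneg _ _ h0]
    exact List.getElem?_set_ne (by omega)

lemma writeFold_getElem?_of_filter (ws : List (Int × Int)) (r : List Int) (t : Nat) (v : Int)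
    (hpos : ∀ q ∈ ws, 0 ≤ q.2) (ht : t < r.length)
    (hf : ws.filter (fun q => q.2 == (t : Int)) = [(v, (t : Int))]) :
    (writeFold ws r)[t]? = some v := by
  induction ws generalizing r with
  | nil => simp at hf
  | cons q ws ih =>
    rw [List.filter_cons] at hf
    by_cases hq : q.2 = (t : Int)
    · rw [if_pos (by simpa using hq)] at hf
      have hq1 : q = (v, (t : Int)) := by
        have := List.head_eq_of_cons_eq hf; simpa using this
      have hrest : ws.filter (fun q => q.2 == (t : Int)) = [] := List.tail_eq_of_cons_eq hf
      have hnone : ∀ p ∈ ws, p.2 ≠ (t : Int) := by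
        intro p hp hpe
        have := List.filter_eq_nil_iff.mp hrest p hp
        simp [hpe] at this
      show (writeFold ws (PySem.List.pySetD r q.2 q.1))[t]? = some v
      rw [writeFold_getElem?_of_not_mem ws _ t (fun p hp => hpos p (List.mem_cons_of_mem _ hp)) hnone]
      rw [hq1]
      rw [PySem.List.pySetD_of_nonneg _ _ (by positivity)]
      simp [ht]
    · rw [if_neg (by simpa using hq)] at hf
      show (writeFold ws (PySem.List.pySetD r q.2 q.1))[t]? = some v
      have h0 : 0 ≤ q.2 := hpos q (by simp)
      exact ih _ (fun p hp => hpos p (List.mem_cons_of_mem _ hp))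
        (by rw [PySem.List.pySetD_of_nonneg _ _ h0, List.length_set]; exact ht) hf

lemma flatMap_single {κ : Type} {x : Int × Int} (l : List κ) (f : κ → List (Int × Int)) (k0 : κ)
    (hnd : l.Nodup) (hk0 : k0 ∈ l) (h0 : f k0 = [x]) (hrest : ∀ k ∈ l, k ≠ k0 → f k = []) :
    l.flatMap f = [x] := by
  induction l with
  | nil => cases hk0
  | cons a l ih =>
    by_cases ha : a = k0
    · subst ha
      have hnil : l.flatMap f = [] := by
        rw [List.flatMap_eq_nil_iff]
        intro k hk
        exact hrest k (List.mem_cons_of_mem _ hk)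
          (fun he => (List.nodup_cons.mp hnd).1 (he ▸ hk))
      simp [List.flatMap_cons, h0, hnil]
    · have hk0' : k0 ∈ l := by
        rcases List.mem_cons.mp hk0 with h | h
        · exact absurd h.symm ha
        · exact h
      rw [List.flatMap_cons, hrest a (by simp) ha, List.nil_append]
      exact ih (List.nodup_cons.mp hnd).2 hk0'
        (fun k hk hne => hrest k (List.mem_cons_of_mem _ hk) hne)

lemma filter_flatMap {κ : Type} (l : List κ) (f : κ → List (Int × Int)) (p : Int × Int → Bool) :
    (l.flatMap f).filter p = l.flatMap (fun k => (f k).filter p) := by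
  induction l with
  | nil => rfl
  | cons a l ih => simp [List.flatMap_cons, List.filter_append, ih]

-- group of a key other than that of cs[t] contributes no write at t
lemma group_ne (cs : List Char) (t : Nat) (ht : t < cs.length) (k : String)
    (hk : k ≠ pvKey cs[t]) :
    (PySem.List.enumerate ((posD cs).getD k []) 0).filter (fun q => q.2 == (t : Int)) = [] := by
  rw [List.filter_eq_nil_iff]
  intro q hq hq2
  have hq2' : q.2 = (t : Int) := by simpa using hq2
  have hmem := mem_enumerate_snd hq
  rw [posD_getD] at hmem
  obtain ⟨p, hp, hpq⟩ := List.mem_map.mp hmem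
  obtain ⟨hpE, hpk⟩ := List.mem_filter.mp hp
  obtain ⟨j, hj, h1, hgt⟩ := (mem_enumerate_iff cs 0 p).mp hpE
  have hjt : j = t := by
    have : p.1 = (t : Int) := by rw [hpq, hq2']
    omega
  subst hjt
  rw [List.getElem?_eq_getElem hj] at hgt
  have hp2 : p.2 = cs[j] := (Option.some.inj hgt).symm
  exact hk (by rw [← (beq_iff_eq).mp hpk, hp2])

-- the group of cs[t]'s key writes exactly rank (cs.take t).count cs[t] at t
lemma group_eq (cs : List Char) (t : Nat) (ht : t < cs.length) :
    (PySem.List.enumerate ((posD cs).getD (pvKey cs[t]) []) 0).filter (fun q => q.2 == (t : Int))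
      = [((((cs.take t).count cs[t] : Nat) : Int), (t : Int))] := by
  rw [posD_getD]
  have hsplit : cs.take t ++ cs[t] :: cs.drop (t + 1) = cs := by
    conv_rhs => rw [← List.take_append_drop t cs]
    rw [List.drop_eq_getElem_cons ht]
  have hlen : (cs.take t).length = t := by simp [List.length_take]; omega
  have hE : PySem.List.enumerate cs 0
      = PySem.List.enumerate (cs.take t) 0
        ++ ((t : Int), cs[t]) :: PySem.List.enumerate (cs.drop (t + 1)) ((t : Int) + 1) := by
    conv_lhs => rw [← hsplit]
    rw [enumerate_append, PySem.List.enumerate_cons, hlen]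
    norm_num
  rw [hE, List.filter_append, List.filter_cons, if_pos (by simp)]
  rw [List.map_append, List.map_cons]
  rw [enumerate_append, PySem.List.enumerate_cons]
  rw [List.filter_append, List.filter_cons, if_pos (by simp)]
  have hA : (PySem.List.enumerate
      (((PySem.List.enumerate (cs.take t) 0).filter (fun p => pvKey p.2 == pvKey cs[t])).map
        (fun x => x.1)) 0).filter (fun q => q.2 == (t : Int)) = [] := by
    rw [List.filter_eq_nil_iff]
    intro q hq hq2
    obtain ⟨p, hp, hpq⟩ := List.mem_map.mp (mem_enumerate_snd hq)
    have hb := (mem_enumerate_fst_bounds (List.mem_filter.mp hp).1).2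
    have hq2' : q.2 = (t : Int) := by simpa using hq2
    rw [hlen] at hb
    omega
  have hB : (PySem.List.enumerate
      (((PySem.List.enumerate (cs.drop (t + 1)) ((t : Int) + 1)).filter
          (fun p => pvKey p.2 == pvKey cs[t])).map (fun x => x.1))
        (0 + ((((PySem.List.enumerate (cs.take t) 0).filter
          (fun p => pvKey p.2 == pvKey cs[t])).map (fun x => x.1)).length : Int) + 1)).filter
      (fun q => q.2 == (t : Int)) = [] := by
    rw [List.filter_eq_nil_iff]
    intro q hq hq2
    obtain ⟨p, hp, hpq⟩ := List.mem_map.mp (mem_enumerate_snd hq)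
    have hb := (mem_enumerate_fst_bounds (List.mem_filter.mp hp).1).1
    have hq2' : q.2 = (t : Int) := by simpa using hq2
    omega
  rw [hA, hB]
  have hAlen : ((PySem.List.enumerate (cs.take t) 0).filter
      (fun p => pvKey p.2 == pvKey cs[t])).length = (cs.take t).count cs[t] := by
    rw [← List.countP_eq_length_filter]
    have h1 : (PySem.List.enumerate (cs.take t) 0).countP (fun p => pvKey p.2 == pvKey cs[t])
        = ((PySem.List.enumerate (cs.take t) 0).map (fun x => x.2)).countP
            (fun c => pvKey c == pvKey cs[t]) := by
      rw [List.countP_map]; rfl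
    rw [h1, PySem.List.map_snd_enumerate, List.count_eq_countP]
    exact List.countP_congr (fun c _ => by rw [pvKey_beq])
  simp [hAlen]

lemma ws_pos (cs : List Char) :
    ∀ q ∈ (posD cs).items.flatMap (fun p => PySem.List.enumerate p.2 0), 0 ≤ q.2 := by
  intro q hq
  obtain ⟨p, hp, hq⟩ := List.mem_flatMap.mp hq
  rcases p with ⟨k, ps⟩
  have hps : (posD cs).getD k [] = ps :=
    PySem.Dict.getD_of_mem_items (posD cs) hp (posD_nodup cs) []
  have hmem := mem_enumerate_snd hq
  rw [← hps, posD_getD] at hmem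
  obtain ⟨p', hp', hpq⟩ := List.mem_map.mp hmem
  have := (mem_enumerate_fst_bounds (List.mem_filter.mp hp').1).1
  omega

lemma ws_filter (cs : List Char) (t : Nat) (ht : t < cs.length) :
    ((posD cs).items.flatMap (fun p => PySem.List.enumerate p.2 0)).filter
        (fun q => q.2 == (t : Int))
      = [((((cs.take t).count cs[t] : Nat) : Int), (t : Int))] := by
  rw [PySem.Dict.items_eq_map_keys (posD cs) (posD_nodup cs) ([] : List Int)]
  rw [List.flatMap_map, filter_flatMap]
  apply flatMap_single _ _ (pvKey cs[t])
  · rw [posD_keys]; exact PySem.Set.nodup_ofList _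
  · rw [posD_keys]
    exact (PySem.Set.mem_ofList _ _).mpr (List.mem_map_of_mem (List.getElem_mem ht))
  · simpa using group_eq cs t ht
  · intro k hk hne
    simpa using group_ne cs t ht k hne

lemma ranksB_eq (cs : List Char) :
    writeFold ((posD cs).items.flatMap (fun p => PySem.List.enumerate p.2 0))
        (List.replicate cs.length (0 : Int))
      = specRanks cs := by
  apply List.ext_getElem?
  intro t
  by_cases ht : t < cs.length
  · rw [writeFold_getElem?_of_filter _ _ t _ (ws_pos cs)
        (by rw [List.length_replicate]; exact ht) (ws_filter cs t ht)]
    have hlen2 : t < (specRanks cs).length := by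
      simp [specRanks]; exact ht
    rw [List.getElem?_eq_getElem hlen2]
    have : (specRanks cs)[t]'hlen2 = (((cs.take t).count cs[t] : Nat) : Int) := by
      simp [specRanks, List.getElem_map, List.getElem_zipIdx]
    rw [this]
  · rw [List.getElem?_eq_none, List.getElem?_eq_none]
    · simp [specRanks]; omega
    · rw [writeFold_length, List.length_replicate]; omega

lemma tplesB_eq (cs : List Char) :
    ((posD cs).items.foldl (fun t p => t.insert p.1 (p.2.length : Int)) PySem.Dict.empty).items
      = (PySem.Dict.counter (cs.map pvKey)).items := by
  have hnd : ((posD cs).items.map (fun p => p.1)).Nodup := posD_nodup cs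
  rw [PySem.Dict.items_foldl_insert_fresh _ _ _ _ (fun p _ => PySem.Dict.contains_empty p.1) hnd]
  rw [PySem.Dict.items_eq_map_keys (posD cs) (posD_nodup cs) ([] : List Int)]
  rw [PySem.Dict.items_counter, posD_keys, List.map_map]
  apply List.map_congr_left
  intro k hk
  simp only [Function.comp_apply]
  congr 1
  rw [posD_getD, List.length_map, ← List.countP_eq_length_filter]
  have h1 : (PySem.List.enumerate cs 0).countP (fun p => pvKey p.2 == k)
      = ((PySem.List.enumerate cs 0).map (fun x => x.2)).countP (fun c => pvKey c == k) := by
    rw [List.countP_map]; rfl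
  rw [h1, PySem.List.map_snd_enumerate, List.count_eq_countP, List.countP_map]
  rfl

lemma rankBwt_alt_eq (bw : String) :
    rankBwt_alt bw
      = (specRanks bw.toList, (PySem.Dict.counter (bw.toList.map pvKey)).items) := by
  have h := PySem.List.foldl_prod_mk
    (fun r (p : String × List Int) =>
      (PySem.List.enumerate p.2 0).foldl (fun r q => PySem.List.pySetD r q.2 q.1) r)
    (fun t (p : String × List Int) => t.insert p.1 (p.2.length : Int))
    (posD bw.toList).items (List.replicate bw.toList.length (0 : Int)) PySem.Dict.empty
  simp only [] at h
  have halt : rankBwt_alt bw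
      = (((posD bw.toList).items.foldl
            (fun (st : List Int × PySem.Dict String Int) p =>
              ((PySem.List.enumerate p.2 0).foldl (fun r q => PySem.List.pySetD r q.2 q.1) st.1,
               st.2.insert p.1 (p.2.length : Int)))
            (List.replicate bw.toList.length (0 : Int), PySem.Dict.empty)).1,
         ((posD bw.toList).items.foldl
            (fun (st : List Int × PySem.Dict String Int) p =>
              ((PySem.List.enumerate p.2 0).foldl (fun r q => PySem.List.pySetD r q.2 q.1) st.1,
               st.2.insert p.1 (p.2.length : Int)))
            (List.replicate bw.toList.length (0 : Int), PySem.Dict.empty)).2.items) := rfl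
  rw [halt, h]
  simp only []
  rw [← List.foldl_flatMap (f := fun (p : String × List Int) => PySem.List.enumerate p.2 0)
      (g := fun r (q : Int × Int) => PySem.List.pySetD r q.2 q.1)]
  exact Prod.ext (ranksB_eq bw.toList) (tplesB_eq bw.toList)

-- ===== VERDICT (by name: the statement is the Claim_ definition above) =====
theorem rankBwt_spec : Claim_equal_rankBwt := by
  intro bw _
  unfold Spec_rankBwt
  rw [rankBwt_eq, rankBwt_alt_eq]
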